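-- pv_equiv track=rewrite | github.com/zixian970819/AIchat_master | lyrics_master.py | BuildBigramFrequencyMap
-- ===== SOURCE A (Python) =====
-- from typing import Dict, List, Tuple, TypeVar
-- import collections
--
-- defaultdict = collections.defaultdict
--
-- def BuildBigramFrequencyMap(lines: List[str]) -> Dict[str, Dict[str, float]]:
--     map: Dict[str, Dict[str, float]] = defaultdict(lambda: defaultdict(lambda: 0))
--     for line in lines:
--         ch0 = ""
--         ch1 = ""
--         for ch1 in line:
--             map[ch0][ch1] += 1
--             ch0 = ch1
--         map[ch1][""] += 1
--     return map
-- ===== SOURCE B (Python) =====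
-- # B: no incremental counting state at all — materialize the full boundary-augmented
-- # bigram stream, group it by leading character, then count each distinct follower
-- # by scanning its group with list.count and assign into the nested map.
-- from typing import Dict, List
-- import collections
--
-- def BuildBigramFrequencyMap(lines: List[str]) -> Dict[str, Dict[str, float]]:
--     pairs = [p for line in lines for p in zip([""] + list(line), list(line) + [""])]
--     map: Dict[str, Dict[str, float]] = collections.defaultdict(lambda: collections.defaultdict(lambda: 0))
--     for a in dict.fromkeys(x for x, _ in pairs):
--         sub = [y for x, y in pairs if x == a]
--         for b in dict.fromkeys(sub):
--             map[a][b] = sub.count(b)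
--     return map
-- ===== Notes on version B (the rewrite author's own statement) =====
-- stated objective: alternative
-- what changed: Removes A's single-pass incremental nested-map update with trailing-character state: B first materializes the full boundary-augmented bigram stream, then groups it by leading character (dict.fromkeys first-occurrence order) and counts each distinct follower by scanning its group with list.count, assigning the counts into the nested map.
import Mathlib
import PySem

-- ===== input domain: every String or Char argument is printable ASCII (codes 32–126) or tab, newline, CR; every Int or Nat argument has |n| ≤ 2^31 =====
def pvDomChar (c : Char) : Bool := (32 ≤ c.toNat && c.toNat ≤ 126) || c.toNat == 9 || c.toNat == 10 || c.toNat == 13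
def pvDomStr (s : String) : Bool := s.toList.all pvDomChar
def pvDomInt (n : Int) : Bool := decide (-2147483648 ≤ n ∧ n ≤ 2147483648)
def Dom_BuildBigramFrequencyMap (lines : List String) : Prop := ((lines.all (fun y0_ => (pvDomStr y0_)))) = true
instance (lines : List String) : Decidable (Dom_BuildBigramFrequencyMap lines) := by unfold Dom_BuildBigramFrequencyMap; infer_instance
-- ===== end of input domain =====

-- B drops A's incremental nested-map update (trailing-character state): it materializes the full
-- boundary-augmented bigram stream, groups it by leading character, and counts each distinct
-- follower by scanning its group with list.count (alternative decomposition, not claimed faster).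

-- ===== PORT A =====
-- inner loop 'for ch1 in line: map[ch0][ch1] += 1; ch0 = ch1' (state: map, ch0, ch1)
def pvAInner (d : PySem.Dict String (PySem.Dict String Int)) (ch0 ch1 : String) (cs : List Char) :
    PySem.Dict String (PySem.Dict String Int) × String × String :=
  match cs with
  | [] => (d, ch0, ch1)
  | c :: rest =>
    let s := String.singleton c
    pvAInner (d.modify ch0 PySem.Dict.empty (fun inner => inner.modify s 0 (· + 1))) s s rest

def BuildBigramFrequencyMap (lines : List String) : List (String × List (String × Int)) :=
  (lines.foldl
    (fun d line =>
      let r := pvAInner d "" "" line.toList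
      -- 'map[ch1][""] += 1' after the loop (r.2.2 is ch1)
      r.1.modify r.2.2 PySem.Dict.empty (fun inner => inner.modify "" 0 (· + 1)))
    PySem.Dict.empty).items.map (fun kv => (kv.1, kv.2.items))

-- ===== PORT B =====
-- zip([""] + list(line), list(line) + [""])
def pvBPairs (line : String) : List (String × String) :=
  let chars : List String := line.toList.map (fun c => String.singleton c)
  ("" :: chars).zip (chars ++ [""])

def BuildBigramFrequencyMap_alt (lines : List String) : List (String × List (String × Int)) :=
  -- pairs = [p for line in lines for p in zip([""] + list(line), list(line) + [""])]
  let pairs : List (String × String) := lines.flatMap pvBPairs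
  -- for a in dict.fromkeys(x for x, _ in pairs):
  --     sub = [y for x, y in pairs if x == a]
  --     for b in dict.fromkeys(sub): map[a][b] = sub.count(b)
  let m : PySem.Dict String (PySem.Dict String Int) :=
    (PySem.Set.ofList (pairs.map (fun p => p.1))).foldl
      (fun m a =>
        let sub : List String := (pairs.filter (fun p => p.1 == a)).map (fun p => p.2)
        m.modify a PySem.Dict.empty
          (fun inner => (PySem.Set.ofList sub).foldl
            (fun inner b => inner.insert b ((sub.count b : Int))) inner))
      PySem.Dict.empty
  m.items.map (fun kv => (kv.1, kv.2.items))

-- ===== PRECONDITION & SPEC =====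
def Spec_BuildBigramFrequencyMap (lines : List String) (out : List (String × List (String × Int))) : Prop := out = BuildBigramFrequencyMap_alt lines
instance (lines : List String) (out : List (String × List (String × Int))) : Decidable (Spec_BuildBigramFrequencyMap lines out) := by unfold Spec_BuildBigramFrequencyMap; infer_instance

-- ===== CLAIM (what is proved, stated in full; the proofs are below) =====
def Claim_equal_BuildBigramFrequencyMap : Prop := ∀ (lines : List String), Dom_BuildBigramFrequencyMap lines → Spec_BuildBigramFrequencyMap lines (BuildBigramFrequencyMap lines)

-- ===== LEMMAS AND PROOFS =====

-- pairs emitted by A's per-line loop, and the final ch1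
def pvPairsFrom (prev : String) (cs : List Char) : List (String × String) :=
  match cs with
  | [] => []
  | c :: rest => (prev, String.singleton c) :: pvPairsFrom (String.singleton c) rest

def pvLast (ch1 : String) (cs : List Char) : String :=
  match cs with
  | [] => ch1
  | c :: rest => pvLast (String.singleton c) rest

theorem pv_zip_pairs (cs : List Char) (prev : String) :
    (prev :: cs.map (fun c => String.singleton c)).zip
      (cs.map (fun c => String.singleton c) ++ [""]) =
    pvPairsFrom prev cs ++ [(pvLast prev cs, "")] := by
  induction cs generalizing prev with
  | nil => simp [pvPairsFrom, pvLast]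
  | cons c rest ih => simp [pvPairsFrom, pvLast, ih]

theorem pv_bPairs_eq (line : String) :
    pvBPairs line = pvPairsFrom "" line.toList ++ [(pvLast "" line.toList, "")] := by
  unfold pvBPairs
  simpa using pv_zip_pairs line.toList ""

-- A's per-line body as a fold of the bigram step over the pair stream
theorem pv_lineA_eq (cs : List Char) (d : PySem.Dict String (PySem.Dict String Int)) (ch0 ch1 : String) :
    (pvAInner d ch0 ch1 cs).1.modify (pvAInner d ch0 ch1 cs).2.2 PySem.Dict.empty
        (fun inner => inner.modify "" 0 (· + 1)) =
    (pvPairsFrom ch0 cs ++ [(pvLast ch1 cs, "")]).foldl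
      (fun d p => d.modify p.1 PySem.Dict.empty (fun inner => inner.modify p.2 0 (· + 1))) d := by
  induction cs generalizing d ch0 ch1 with
  | nil => simp [pvAInner, pvPairsFrom, pvLast]
  | cons c rest ih => simp [pvAInner, pvPairsFrom, pvLast, ih]

-- generic: getD of a modify-at-key fold is a fold over the filtered stream
theorem pv_getD_foldl_modify {κ ν β : Type} [BEq κ] [LawfulBEq κ]
    (l : List β) (key : β → κ) (d0 : ν) (f : β → ν → ν) (m : PySem.Dict κ ν) (a : κ) :
    (l.foldl (fun m x => m.modify (key x) d0 (f x)) m).getD a d0 =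
    (l.filter (fun x => key x == a)).foldl (fun v x => f x v) (m.getD a d0) := by
  induction l generalizing m with
  | nil => rfl
  | cons x rest ih =>
    by_cases h : key x = a
    · subst h
      simp only [List.foldl_cons, List.filter_cons, BEq.rfl, if_true, ih,
        PySem.Dict.getD_modify_self]
    · have hb : (key x == a) = false := by simp [h]
      simp only [List.foldl_cons, List.filter_cons, hb, Bool.false_eq_true, if_false, ih,
        PySem.Dict.getD_modify_of_ne m d0 (f x) (fun hc => h hc.symm)]

-- the per-prev group counted by scanning equals the counter of that group
theorem pv_inner_eq (sub : List String) :
    PySem.Dict.counter sub =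
    (PySem.Set.ofList sub).foldl
      (fun inner b => inner.insert b ((sub.count b : Int)))
      (PySem.Dict.empty : PySem.Dict String Int) := by
  apply PySem.Dict.ext
  rw [PySem.Dict.items_counter]
  have h := PySem.Dict.items_foldl_insert_fresh (PySem.Set.ofList sub)
    (fun b => b) (fun b => ((sub.count b : Int))) PySem.Dict.empty
    (fun b _ => @PySem.Dict.contains_empty String Int _ b)
    (by simpa using PySem.Set.nodup_ofList sub)
  simpa using h.symm

-- filtering a nodup list for a member gives the singleton
theorem pv_filter_nodup_mem {α : Type} [BEq α] [LawfulBEq α]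
    (l : List α) (a : α) (hnd : l.Nodup) (ha : a ∈ l) :
    l.filter (fun x => x == a) = [a] := by
  induction l with
  | nil => cases ha
  | cons x rest ih =>
    rcases List.nodup_cons.mp hnd with ⟨hx, hrest⟩
    by_cases hxa : x = a
    · subst hxa
      have : rest.filter (fun y => y == x) = [] := by
        refine List.filter_eq_nil_iff.mpr ?_
        intro y hy
        simp only [beq_iff_eq]
        intro he; exact hx (he ▸ hy)
      simp [List.filter_cons, this]
    · have hb : (x == a) = false := by simp [hxa]
      have ha' : a ∈ rest := by
        rcases List.mem_cons.mp ha with h | h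
        · exact absurd h.symm hxa
        · exact h
      simp [List.filter_cons, hb, ih hrest ha']

-- main bridge: the nested incremental fold equals the group-then-count fold
theorem pv_main (ps : List (String × String)) :
    ps.foldl (fun d p => d.modify p.1 PySem.Dict.empty (fun inner => inner.modify p.2 0 (· + 1)))
      (PySem.Dict.empty : PySem.Dict String (PySem.Dict String Int)) =
    (PySem.Set.ofList (ps.map (fun p => p.1))).foldl
      (fun m a => m.modify a PySem.Dict.empty
        (fun inner => (PySem.Set.ofList ((ps.filter (fun p => p.1 == a)).map (fun p => p.2))).foldl
          (fun inner b => inner.insert b ((((ps.filter (fun p => p.1 == a)).map (fun p => p.2)).count b : Int))) inner))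
      (PySem.Dict.empty : PySem.Dict String (PySem.Dict String Int)) := by
  have hempty : (PySem.Dict.empty : PySem.Dict String (PySem.Dict String Int)).keys.Nodup := by
    simp [PySem.Dict.keys_empty]
  have hndL : (ps.foldl (fun d p => d.modify p.1 PySem.Dict.empty
        (fun inner => inner.modify p.2 0 (· + 1))) (PySem.Dict.empty : PySem.Dict String (PySem.Dict String Int))).keys.Nodup :=
    PySem.Dict.nodup_keys_foldl_modify_key ps (fun p => p.1) PySem.Dict.empty
      (fun _ p inner => inner.modify p.2 0 (· + 1)) PySem.Dict.empty hempty
  have hndR : ((PySem.Set.ofList (ps.map (fun p => p.1))).foldl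
      (fun m a => m.modify a PySem.Dict.empty
        (fun inner => (PySem.Set.ofList ((ps.filter (fun p => p.1 == a)).map (fun p => p.2))).foldl
          (fun inner b => inner.insert b ((((ps.filter (fun p => p.1 == a)).map (fun p => p.2)).count b : Int))) inner))
      (PySem.Dict.empty : PySem.Dict String (PySem.Dict String Int))).keys.Nodup :=
    PySem.Dict.nodup_keys_foldl_modify_key (PySem.Set.ofList (ps.map (fun p => p.1)))
      (fun a => a) PySem.Dict.empty _ PySem.Dict.empty hempty
  have hkL : (ps.foldl (fun d p => d.modify p.1 PySem.Dict.empty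
        (fun inner => inner.modify p.2 0 (· + 1))) (PySem.Dict.empty : PySem.Dict String (PySem.Dict String Int))).keys =
      PySem.Set.ofList (ps.map (fun p => p.1)) := by
    rw [PySem.Dict.keys_foldl_modify_key ps (fun p => p.1) PySem.Dict.empty
      (fun _ p inner => inner.modify p.2 0 (· + 1)) PySem.Dict.empty]
    simp [PySem.Dict.keys_empty, PySem.Set.update_nil_left]
  have hkR : ((PySem.Set.ofList (ps.map (fun p => p.1))).foldl
      (fun m a => m.modify a PySem.Dict.empty
        (fun inner => (PySem.Set.ofList ((ps.filter (fun p => p.1 == a)).map (fun p => p.2))).foldl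
          (fun inner b => inner.insert b ((((ps.filter (fun p => p.1 == a)).map (fun p => p.2)).count b : Int))) inner))
      (PySem.Dict.empty : PySem.Dict String (PySem.Dict String Int))).keys =
      PySem.Set.ofList (ps.map (fun p => p.1)) := by
    rw [PySem.Dict.keys_foldl_modify_key (PySem.Set.ofList (ps.map (fun p => p.1)))
      (fun a => a) PySem.Dict.empty _ PySem.Dict.empty]
    simp only [PySem.Dict.keys_empty, PySem.Set.update_nil_left, List.map_id']
    exact PySem.Set.ofList_ofList _
  have hinner : ∀ a ∈ PySem.Set.ofList (ps.map (fun p => p.1)),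
      (ps.foldl (fun d p => d.modify p.1 PySem.Dict.empty
        (fun inner => inner.modify p.2 0 (· + 1))) (PySem.Dict.empty : PySem.Dict String (PySem.Dict String Int))).getD a PySem.Dict.empty =
      ((PySem.Set.ofList (ps.map (fun p => p.1))).foldl
        (fun m a => m.modify a PySem.Dict.empty
          (fun inner => (PySem.Set.ofList ((ps.filter (fun p => p.1 == a)).map (fun p => p.2))).foldl
            (fun inner b => inner.insert b ((((ps.filter (fun p => p.1 == a)).map (fun p => p.2)).count b : Int))) inner))
        (PySem.Dict.empty : PySem.Dict String (PySem.Dict String Int))).getD a PySem.Dict.empty := by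
    intro a ha
    have h1 : (ps.foldl (fun d p => d.modify p.1 PySem.Dict.empty
          (fun inner => inner.modify p.2 0 (· + 1))) (PySem.Dict.empty : PySem.Dict String (PySem.Dict String Int))).getD a PySem.Dict.empty =
        (ps.filter (fun p => p.1 == a)).foldl (fun v p => v.modify p.2 0 (· + 1))
          ((PySem.Dict.empty : PySem.Dict String (PySem.Dict String Int)).getD a PySem.Dict.empty) :=
      pv_getD_foldl_modify ps (fun p => p.1) PySem.Dict.empty
        (fun p inner => inner.modify p.2 0 (· + 1)) PySem.Dict.empty a
    have h2 : ((PySem.Set.ofList (ps.map (fun p => p.1))).foldl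
        (fun m a => m.modify a PySem.Dict.empty
          (fun inner => (PySem.Set.ofList ((ps.filter (fun p => p.1 == a)).map (fun p => p.2))).foldl
            (fun inner b => inner.insert b ((((ps.filter (fun p => p.1 == a)).map (fun p => p.2)).count b : Int))) inner))
        (PySem.Dict.empty : PySem.Dict String (PySem.Dict String Int))).getD a PySem.Dict.empty =
        ((PySem.Set.ofList (ps.map (fun p => p.1))).filter (fun x => x == a)).foldl
          (fun v x => (PySem.Set.ofList ((ps.filter (fun p => p.1 == x)).map (fun p => p.2))).foldl
            (fun inner b => inner.insert b ((((ps.filter (fun p => p.1 == x)).map (fun p => p.2)).count b : Int))) v)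
          ((PySem.Dict.empty : PySem.Dict String (PySem.Dict String Int)).getD a PySem.Dict.empty) :=
      pv_getD_foldl_modify (PySem.Set.ofList (ps.map (fun p => p.1))) (fun a => a)
        PySem.Dict.empty _ PySem.Dict.empty a
    rw [PySem.Dict.getD_empty] at h1 h2
    have hfilt : (PySem.Set.ofList (ps.map (fun p => p.1))).filter (fun x => x == a) = [a] :=
      pv_filter_nodup_mem _ a (PySem.Set.nodup_ofList _) ha
    have h4 : (ps.filter (fun p => p.1 == a)).foldl (fun v p => v.modify p.2 0 (· + 1))
        (PySem.Dict.empty : PySem.Dict String Int) =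
        PySem.Dict.counter ((ps.filter (fun p => p.1 == a)).map (fun p => p.2)) := by
      rw [PySem.Dict.counter_eq_foldl, List.foldl_map]
    rw [h1, h2, hfilt, h4]
    simp only [List.foldl_cons, List.foldl_nil]
    exact pv_inner_eq ((ps.filter (fun p => p.1 == a)).map (fun p => p.2))
  apply PySem.Dict.ext
  rw [PySem.Dict.items_eq_map_keys _ hndL PySem.Dict.empty,
      PySem.Dict.items_eq_map_keys _ hndR PySem.Dict.empty, hkL, hkR]
  refine List.map_congr_left ?_
  intro a ha
  rw [hinner a ha]

-- ===== VERDICT (by name: the statement is the Claim_ definition above) =====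
theorem BuildBigramFrequencyMap_spec : Claim_equal_BuildBigramFrequencyMap := by
  intro lines _
  unfold Spec_BuildBigramFrequencyMap BuildBigramFrequencyMap BuildBigramFrequencyMap_alt
  have hline : ∀ (d : PySem.Dict String (PySem.Dict String Int)) (line : String),
      (pvAInner d "" "" line.toList).1.modify (pvAInner d "" "" line.toList).2.2 PySem.Dict.empty
        (fun inner => inner.modify "" 0 (· + 1)) =
      (pvBPairs line).foldl
        (fun d p => d.modify p.1 PySem.Dict.empty (fun inner => inner.modify p.2 0 (· + 1))) d := by
    intro d line
    rw [pv_bPairs_eq]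
    exact pv_lineA_eq line.toList d "" ""
  simp only [hline]
  rw [← List.foldl_flatMap, pv_main]
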